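-- pv_equiv track=rewrite | github.com/onyx-dot-app/onyx | backend/onyx/tools/tool_implementations/open_url/snippet_matcher.py | _get_word_positions
-- ===== SOURCE A (Python) =====
-- def _get_word_positions(original: str, processed: str) -> list[tuple[int, int]]:
--     """
--     Returns a list where index i gives (start, end) char positions
--     in the original string for word i in the processed string.
--     """
--     processed_words = processed.split()
--     word_positions: list[tuple[int, int]] = []
--
--     search_start = 0
--     for word in processed_words:
--         # Find this word in the original (case-insensitive, allowing for punctuation)
--         # We search character by character for alphanumeric sequences
--         while search_start < len(original):
--             # Skip non-alphanumeric chars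
--             while search_start < len(original) and not original[search_start].isalnum():
--                 search_start += 1
--
--             if search_start >= len(original):
--                 break
--
--             # Extract the next "word" from original
--             word_start = search_start
--             while search_start < len(original) and original[search_start].isalnum():
--                 search_start += 1
--             word_end = search_start
--
--             original_word = original[word_start:word_end].lower()
--
--             # Check if this matches the processed word
--             if original_word == word:
--                 word_positions.append((word_start, word_end))
--                 break
--
--     return word_positions
-- ===== SOURCE B (Python) =====
-- def _get_word_positions(original: str, processed: str) -> list[tuple[int, int]]:
--     # Index the original once: spans[k] = (start, end) of the k-th alphanumeric run,
--     # occ maps each lowercased run text to the increasing list of its run indices.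
--     n = len(original)
--     spans: list[tuple[int, int]] = []
--     occ: dict[str, list[int]] = {}
--     i = 0
--     while i < n:
--         if original[i].isalnum():
--             j = i
--             while j < n and original[j].isalnum():
--                 j += 1
--             text = original[i:j].lower()
--             occ[text] = occ.get(text, []) + [len(spans)]
--             spans.append((i, j))
--             i = j
--         else:
--             i += 1
--     # Match each processed word through its own occurrence list with a per-word
--     # cursor; the original's runs are never re-scanned during matching.
--     result: list[tuple[int, int]] = []
--     cursors: dict[str, int] = {}
--     t = 0  # runs with index < t are consumed
--     for word in processed.split():
--         lst = occ.get(word, [])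
--         k = cursors.get(word, 0)
--         while k < len(lst) and lst[k] < t:
--             k += 1
--         if k == len(lst):
--             break
--         cursors[word] = k + 1
--         t = lst[k] + 1
--         result.append(spans[lst[k]])
--     return result
-- ===== Notes on version B (the rewrite author's own statement) =====
-- stated objective: alternative
-- what changed: A rescans the original character by character inside the per-word loop; B builds, in one pass, an occurrence index (dict: lowered run text -> list of run indices, plus a spans table) and then resolves each processed word through that dict with per-word cursors, so the matching phase never scans the original's runs.
import Mathlib
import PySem

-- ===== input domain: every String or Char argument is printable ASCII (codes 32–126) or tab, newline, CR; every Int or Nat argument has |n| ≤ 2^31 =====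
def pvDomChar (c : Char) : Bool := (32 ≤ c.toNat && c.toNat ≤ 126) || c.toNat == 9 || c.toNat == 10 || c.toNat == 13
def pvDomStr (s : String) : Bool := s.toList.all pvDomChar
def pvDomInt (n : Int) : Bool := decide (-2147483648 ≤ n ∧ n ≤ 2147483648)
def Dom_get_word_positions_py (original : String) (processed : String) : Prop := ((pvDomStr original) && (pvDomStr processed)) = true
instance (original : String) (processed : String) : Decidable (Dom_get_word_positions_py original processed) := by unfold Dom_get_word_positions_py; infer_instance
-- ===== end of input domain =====

-- B replaces A's per-word rescanning of the original by a one-pass occurrence index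
-- (lowered run text -> list of run indices) consulted with per-word cursors, so the
-- matching phase never scans the original's runs (alternative decomposition);
-- same return value on every input.
-- (Loops are rendered as structural recursion on an explicit fuel that is always
-- sufficient — a totality device only, not a change of algorithm.)

-- shared tiny helper: the loop "while j < n and original[j].isalnum(): j += 1",
-- present verbatim in both Pythons
def scanRun (cs : List Char) (fuel : Nat) (j : Nat) : Nat :=
  match fuel with
  | 0 => j
  | fuel+1 =>
    if h : j < cs.length then
      if PySem.Chars.isalnum (cs[j]'h) then scanRun cs fuel (j+1) else j
    else j

-- ===== PORT A =====
-- "while search_start < len(original) and not original[search_start].isalnum(): search_start += 1"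
def aSkip (cs : List Char) (fuel : Nat) (s : Nat) : Nat :=
  match fuel with
  | 0 => s
  | fuel+1 =>
    if h : s < cs.length then
      if ¬ PySem.Chars.isalnum (cs[s]'h) then aSkip cs fuel (s+1) else s
    else s

-- the inner "while search_start < len(original): …" of A for one processed word:
-- returns (matched (start,end) if any, new search_start)
def aFind (cs : List Char) (word : List Char) (fuel : Nat) (s : Nat) : Option (Nat × Nat) × Nat :=
  match fuel with
  | 0 => (none, s)
  | fuel+1 =>
    if s < cs.length then
      let s1 := aSkip cs cs.length s
      if cs.length ≤ s1 then (none, s1)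
      else
        let e := scanRun cs cs.length s1
        -- original[word_start:word_end].lower() == word  (0 ≤ s1 ≤ e ≤ len, so the
        -- Python slice is exactly drop/take)
        if PySem.Chars.lower ((cs.drop s1).take (e - s1)) = word then (some (s1, e), e)
        else aFind cs word fuel e
    else (none, s)

-- one iteration of A's "for word in processed_words" loop
def aStep (cs : List Char) (st : Nat × List (Int × Int)) (w : List Char) :
    Nat × List (Int × Int) :=
  match aFind cs w cs.length st.1 with
  | (some (a, b), s') => (s', st.2 ++ [((a : Int), (b : Int))])
  | (none, s') => (s', st.2)

def get_word_positions_py (original : String) (processed : String) : List (Int × Int) :=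
  let cs := original.toList
  let words := PySem.Chars.split₀ processed.toList   -- processed.split()
  (words.foldl (aStep cs) (0, ([] : List (Int × Int)))).2

-- ===== PORT B =====
-- B's indexing pass: one walk over the original building, simultaneously,
--   spans  — (start, end) of each maximal alphanumeric run, in order, and
--   occ    — dict: lowered run text -> increasing list of run indices
--             ("occ[text] = occ.get(text, []) + [len(spans)]").
def bBuild (cs : List Char) (fuel : Nat) (i : Nat)
    (spans : List (Int × Int)) (occ : PySem.Dict (List Char) (List Nat)) :
    List (Int × Int) × PySem.Dict (List Char) (List Nat) :=
  match fuel with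
  | 0 => (spans, occ)
  | fuel+1 =>
    if h : i < cs.length then
      if PySem.Chars.isalnum (cs[i]'h) then
        let j := scanRun cs cs.length i
        let text := PySem.Chars.lower ((cs.drop i).take (j - i))
        bBuild cs fuel j (spans ++ [((i : Int), (j : Int))])
          (occ.modify text [] (· ++ [spans.length]))
      else bBuild cs fuel (i+1) spans occ
    else (spans, occ)

-- "while k < len(lst) and lst[k] < t: k += 1"
def cursorAdv (lst : List Nat) (t : Nat) (fuel : Nat) (k : Nat) : Nat :=
  match fuel with
  | 0 => k
  | fuel+1 =>
    match lst[k]? with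
    | some v => if v < t then cursorAdv lst t fuel (k+1) else k
    | none => k

-- B's matching loop over the processed words ("break" = returning the result so far)
def bMatch (spans : List (Int × Int)) (occ : PySem.Dict (List Char) (List Nat)) :
    List (List Char) → Nat → PySem.Dict (List Char) Nat → List (Int × Int) → List (Int × Int)
  | [], _, _, result => result
  | w :: ws, t, cursors, result =>
    let lst := occ.getD w []
    let k := cursorAdv lst t lst.length (cursors.getD w 0)
    if k = lst.length then result   -- "if k == len(lst): break"
    else
      match lst[k]? with
      | none => result   -- unreachable: k ≤ len(lst) in every reachable state
      | some v =>
        -- v = lst[k]; spans[v] is in range by construction (run indices < len(spans))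
        bMatch spans occ ws (v + 1) (cursors.insert w (k + 1))
          (result ++ [(spans[v]?).getD (0, 0)])

def get_word_positions_py_alt (original : String) (processed : String) : List (Int × Int) :=
  let cs := original.toList
  let built := bBuild cs cs.length 0 [] PySem.Dict.empty
  bMatch built.1 built.2 (PySem.Chars.split₀ processed.toList) 0 PySem.Dict.empty []

-- ===== PRECONDITION & SPEC =====
def Spec_get_word_positions_py (original : String) (processed : String) (out : List (Int × Int)) : Prop := out = get_word_positions_py_alt original processed
instance (original : String) (processed : String) (out : List (Int × Int)) : Decidable (Spec_get_word_positions_py original processed out) := by unfold Spec_get_word_positions_py; infer_instance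

-- ===== CLAIM (what is proved, stated in full; the proofs are below) =====
def Claim_equal_get_word_positions_py : Prop := ∀ (original : String) (processed : String), Dom_get_word_positions_py original processed → Spec_get_word_positions_py original processed (get_word_positions_py original processed)

-- ===== LEMMAS AND PROOFS =====

-- proof-side intermediate: the token list of the original, and a pointer walk over it

def bTokens (cs : List Char) (fuel : Nat) (i : Nat) : List (Nat × Nat × List Char) :=
  match fuel with
  | 0 => []
  | fuel+1 =>
    if h : i < cs.length then
      if PySem.Chars.isalnum (cs[i]'h) then
        let j := scanRun cs cs.length i
        (i, j, PySem.Chars.lower ((cs.drop i).take (j - i))) :: bTokens cs fuel j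
      else bTokens cs fuel (i+1)
    else []

def bAdvance (toks : List (Nat × Nat × List Char)) (word : List Char) (fuel : Nat) (t : Nat) : Nat :=
  match fuel with
  | 0 => t
  | fuel+1 =>
    match toks[t]? with
    | some tok => if tok.2.2 ≠ word then bAdvance toks word fuel (t+1) else t
    | none => t

def pStep (toks : List (Nat × Nat × List Char)) (st : Nat × List (Int × Int))
    (w : List Char) : Nat × List (Int × Int) :=
  let t := bAdvance toks w toks.length st.1
  match toks[t]? with
  | some tok => (t + 1, st.2 ++ [((tok.1 : Int), (tok.2.1 : Int))])
  | none => (t, st.2)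

def spanOf (tok : Nat × Nat × List Char) : Int × Int := ((tok.1 : Int), (tok.2.1 : Int))

-- (text, run index) pairs of a token list, indices starting at idx
def pairsOf : List (Nat × Nat × List Char) → Nat → List (List Char × Nat)
  | [], _ => []
  | tok :: ts, idx => (tok.2.2, idx) :: pairsOf ts (idx + 1)

-- the occurrence-index list of word w in toks
def idxsOf (toks : List (Nat × Nat × List Char)) (w : List Char) : List Nat :=
  ((pairsOf toks 0).filter (fun p => p.1 == w)).map (·.2)

theorem scanRun_ge (cs : List Char) (fuel j : Nat) : j ≤ scanRun cs fuel j := by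
  fun_induction scanRun cs fuel j with
  | case1 => omega
  | case2 j h ha ih => omega
  | case3 j h ha => omega
  | case4 j h => omega

theorem scanRun_gt (cs : List Char) (fuel j : Nat) (h : j < cs.length)
    (hf : 0 < fuel) (ha : PySem.Chars.isalnum (cs[j]'h) = true) :
    j + 1 ≤ scanRun cs fuel j := by
  cases fuel with
  | zero => omega
  | succ f =>
    rw [scanRun, dif_pos h, if_pos ha]
    exact scanRun_ge cs f (j+1)

theorem aSkip_ge (cs : List Char) (fuel s : Nat) : s ≤ aSkip cs fuel s := by
  fun_induction aSkip cs fuel s with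
  | case1 => omega
  | case2 s h ha ih => omega
  | case3 s h ha => omega
  | case4 s h => omega

theorem aSkip_alnum (cs : List Char) (fuel s : Nat) :
    cs.length ≤ s + fuel → ∀ (h : aSkip cs fuel s < cs.length),
      PySem.Chars.isalnum (cs[aSkip cs fuel s]'h) = true := by
  fun_induction aSkip cs fuel s with
  | case1 s => intro hf h; omega
  | case2 s fuel h ha ih => intro hf hh; exact ih (by omega) hh
  | case3 s fuel h ha => intro _ _; simpa using ha
  | case4 s fuel h => intro _ hh; omega

theorem bTokens_ge (cs : List Char) (fuel i : Nat) (h : cs.length ≤ i) :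
    bTokens cs fuel i = [] := by
  cases fuel with
  | zero => rfl
  | succ f => rw [bTokens, dif_neg (by omega)]

-- the token list does not depend on the fuel, as long as the fuel is sufficient
theorem bTokens_fuel (cs : List Char) :
    ∀ (f1 : Nat), ∀ (f2 i : Nat), cs.length ≤ i + f1 → cs.length ≤ i + f2 →
      bTokens cs f1 i = bTokens cs f2 i := by
  intro f1
  induction f1 with
  | zero =>
    intro f2 i h1 h2
    rw [bTokens_ge cs 0 i (by omega), bTokens_ge cs f2 i (by omega)]
  | succ f ih =>
    intro f2 i h1 h2
    by_cases hi : i < cs.length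
    · obtain ⟨g, rfl⟩ : ∃ g, f2 = g + 1 := ⟨f2 - 1, by omega⟩
      rw [bTokens, bTokens, dif_pos hi, dif_pos hi]
      by_cases ha : PySem.Chars.isalnum (cs[i]'hi) = true
      · rw [if_pos ha, if_pos ha]
        have hj : i + 1 ≤ scanRun cs cs.length i := scanRun_gt cs cs.length i hi (by omega) ha
        exact congrArg _ (ih g (scanRun cs cs.length i) (by omega) (by omega))
      · rw [if_neg ha, if_neg ha]
        exact ih g (i+1) (by omega) (by omega)
    · rw [bTokens_ge cs (f+1) i (by omega), bTokens_ge cs f2 i (by omega)]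

-- one non-alphanumeric character changes no token
theorem bT_step (cs : List Char) (s : Nat) (hs : s < cs.length)
    (ha : ¬ PySem.Chars.isalnum (cs[s]'hs) = true) :
    bTokens cs cs.length s = bTokens cs cs.length (s+1) := by
  rw [bTokens_fuel cs cs.length (cs.length + 1) s (by omega) (by omega),
    bTokens, dif_pos hs, if_neg ha]

-- skipping non-alphanumeric chars (with any fuel) does not change the token list
theorem bT_skip (cs : List Char) :
    ∀ (f s : Nat), bTokens cs cs.length s = bTokens cs cs.length (aSkip cs f s) := by
  intro f
  induction f with
  | zero => intro s; rfl
  | succ f ih =>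
    intro s
    rw [aSkip]
    by_cases hs : s < cs.length
    · rw [dif_pos hs]
      by_cases ha : PySem.Chars.isalnum (cs[s]'hs) = true
      · rw [if_neg (by simpa using ha)]
      · rw [if_pos (by simpa using ha), ← ih (s+1)]
        exact bT_step cs s hs ha
    · rw [dif_neg hs]

-- tokenization unfolding at an alnum position
theorem bT_cons (cs : List Char) (i : Nat) (h : i < cs.length)
    (ha : PySem.Chars.isalnum (cs[i]'h) = true) :
    bTokens cs cs.length i =
      (i, scanRun cs cs.length i,
        PySem.Chars.lower ((cs.drop i).take (scanRun cs cs.length i - i)))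
        :: bTokens cs cs.length (scanRun cs cs.length i) := by
  rw [bTokens_fuel cs cs.length (cs.length + 1) i (by omega) (by omega),
    bTokens, dif_pos h, if_pos ha]

theorem bAdv_none (toks : List (Nat × Nat × List Char)) (word : List Char) (t : Nat)
    (hget : toks[t]? = none) : ∀ f, bAdvance toks word f t = t := by
  intro f
  cases f with
  | zero => rfl
  | succ f => rw [bAdvance, hget]

theorem bAdv_stop (toks : List (Nat × Nat × List Char)) (word : List Char) (t : Nat)
    (tok : Nat × Nat × List Char) (hget : toks[t]? = some tok)
    (hw : tok.2.2 = word) : ∀ f, bAdvance toks word f t = t := by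
  intro f
  cases f with
  | zero => rfl
  | succ f => rw [bAdvance, hget]; simp [hw]

theorem bAdv_next (toks : List (Nat × Nat × List Char)) (word : List Char) (t : Nat)
    (tok : Nat × Nat × List Char) (hget : toks[t]? = some tok)
    (hw : tok.2.2 ≠ word) (f : Nat) :
    bAdvance toks word (f+1) t = bAdvance toks word f (t+1) := by
  rw [bAdvance, hget]; simp [hw]

-- the pointer walk does not depend on the fuel, as long as the fuel is sufficient
theorem bAdv_fuel (toks : List (Nat × Nat × List Char)) (word : List Char) :
    ∀ (f1 : Nat), ∀ (f2 t : Nat), toks.length ≤ t + f1 → toks.length ≤ t + f2 →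
      bAdvance toks word f1 t = bAdvance toks word f2 t := by
  intro f1
  induction f1 with
  | zero =>
    intro f2 t h1 h2
    have hget : toks[t]? = none := List.getElem?_eq_none (by omega)
    rw [bAdv_none toks word t hget 0, bAdv_none toks word t hget f2]
  | succ f ih =>
    intro f2 t h1 h2
    cases hget : toks[t]? with
    | none => rw [bAdv_none toks word t hget (f+1), bAdv_none toks word t hget f2]
    | some tok =>
      have ht : t < toks.length := (List.getElem?_eq_some_iff.mp hget).1
      obtain ⟨g, rfl⟩ : ∃ g, f2 = g + 1 := ⟨f2 - 1, by omega⟩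
      by_cases hw : tok.2.2 = word
      · rw [bAdv_stop toks word t tok hget hw (f+1), bAdv_stop toks word t tok hget hw (g+1)]
      · rw [bAdv_next toks word t tok hget hw f, bAdv_next toks word t tok hget hw g]
        exact ih (g) (t+1) (by omega) (by omega)

-- drop t = x :: l gives the indexed view
theorem drop_cons_getElem? {α : Type} (toks : List α) (t : Nat) (x : α) (l : List α)
    (h : toks.drop t = x :: l) : toks[t]? = some x ∧ toks.drop (t+1) = l := by
  constructor
  · have : (toks.drop t)[0]? = some x := by rw [h]; rfl
    simpa [List.getElem?_drop] using this
  · have : (toks.drop t).drop 1 = l := by rw [h]; rfl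
    simpa [List.drop_drop, Nat.add_comm] using this

theorem drop_nil_getElem? {α : Type} (toks : List α) (t : Nat)
    (h : toks.drop t = []) : toks[t]? = none := by
  have : (toks.drop t)[0]? = none := by rw [h]; rfl
  simpa [List.getElem?_drop] using this

-- the key correspondence: A's per-word scan from position s ≡ the pointer walk from
-- index t, whenever the tokens still ahead of s are exactly the tokens from index t on
theorem key (cs : List Char) (toks : List (Nat × Nat × List Char))
    (word : List Char) (fuel s : Nat) :
    ∀ t : Nat, cs.length ≤ s + fuel →
    bTokens cs cs.length s = toks.drop t →
    (aFind cs word fuel s).1 =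
      (toks[bAdvance toks word toks.length t]?).map (fun tok => (tok.1, tok.2.1)) ∧
    bTokens cs cs.length (aFind cs word fuel s).2 =
      toks.drop (match toks[bAdvance toks word toks.length t]? with
                 | some _ => bAdvance toks word toks.length t + 1
                 | none => bAdvance toks word toks.length t) := by
  fun_induction aFind cs word fuel s with
  | case1 s =>
    intro t hf hinv
    have hnil : bTokens cs cs.length s = [] := bTokens_ge cs cs.length s (by omega)
    have hget : toks[t]? = none := drop_nil_getElem? toks t (hinv.symm.trans hnil)
    rw [bAdv_none toks word t hget toks.length, hget]
    exact ⟨rfl, hinv⟩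
  | case2 s fuel hs s1 hm =>
    intro t hf hinv
    have hm' : cs.length ≤ aSkip cs cs.length s := hm
    have hnil : bTokens cs cs.length s = [] := by
      rw [bT_skip cs cs.length s]
      exact bTokens_ge cs cs.length _ hm'
    have hget : toks[t]? = none := drop_nil_getElem? toks t (hinv.symm.trans hnil)
    rw [bAdv_none toks word t hget toks.length, hget]
    refine ⟨rfl, ?_⟩
    show bTokens cs cs.length (aSkip cs cs.length s) = toks.drop t
    rw [← bT_skip cs cs.length s, hinv]
  | case3 s fuel hs s1 h1 e hm =>
    intro t hf hinv
    have hlt : aSkip cs cs.length s < cs.length := by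
      have h1' : ¬ cs.length ≤ aSkip cs cs.length s := h1; omega
    have ha := aSkip_alnum cs cs.length s (by omega) hlt
    have hcons := bT_cons cs (aSkip cs cs.length s) hlt ha
    have hd := drop_cons_getElem? toks t _ _
      (hinv.symm.trans ((bT_skip cs cs.length s).trans hcons))
    have hw : (aSkip cs cs.length s, scanRun cs cs.length (aSkip cs cs.length s),
        PySem.Chars.lower ((cs.drop (aSkip cs cs.length s)).take
          (scanRun cs cs.length (aSkip cs cs.length s) - aSkip cs cs.length s))).2.2
        = word := hm
    rw [bAdv_stop toks word t _ hd.1 hw toks.length, hd.1]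
    exact ⟨rfl, hd.2.symm⟩
  | case4 s fuel hs s1 h1 e hm ih =>
    intro t hf hinv
    have hlt : aSkip cs cs.length s < cs.length := by
      have h1' : ¬ cs.length ≤ aSkip cs cs.length s := h1; omega
    have ha := aSkip_alnum cs cs.length s (by omega) hlt
    have hcons := bT_cons cs (aSkip cs cs.length s) hlt ha
    have hd := drop_cons_getElem? toks t _ _
      (hinv.symm.trans ((bT_skip cs cs.length s).trans hcons))
    have hw : (aSkip cs cs.length s, scanRun cs cs.length (aSkip cs cs.length s),
        PySem.Chars.lower ((cs.drop (aSkip cs cs.length s)).take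
          (scanRun cs cs.length (aSkip cs cs.length s) - aSkip cs cs.length s))).2.2
        ≠ word := hm
    have ht : t < toks.length := (List.getElem?_eq_some_iff.mp hd.1).1
    have hadv : bAdvance toks word toks.length t = bAdvance toks word toks.length (t+1) := by
      rw [bAdv_fuel toks word toks.length (toks.length + 1) t (by omega) (by omega),
        bAdv_next toks word t _ hd.1 hw toks.length]
    rw [hadv]
    have hge : s + 1 ≤ scanRun cs cs.length (aSkip cs cs.length s) := by
      have h2 := aSkip_ge cs cs.length s
      have h3 := scanRun_gt cs cs.length (aSkip cs cs.length s) hlt (by omega) ha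
      omega
    refine ih (t+1) ?_ hd.2.symm
    show cs.length ≤ scanRun cs cs.length (aSkip cs cs.length s) + fuel
    omega
  | case5 s fuel hs =>
    intro t hf hinv
    have hnil : bTokens cs cs.length s = [] := bTokens_ge cs cs.length s (by omega)
    have hget : toks[t]? = none := drop_nil_getElem? toks t (hinv.symm.trans hnil)
    rw [bAdv_none toks word t hget toks.length, hget]
    exact ⟨rfl, hinv⟩

-- A's fold over the processed words ≡ the pointer fold
theorem fold_eq (cs : List Char) (toks : List (Nat × Nat × List Char))
    (words : List (List Char)) :
    ∀ (s t : Nat) (acc : List (Int × Int)),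
      bTokens cs cs.length s = toks.drop t →
      (words.foldl (aStep cs) (s, acc)).2 = (words.foldl (pStep toks) (t, acc)).2 := by
  induction words with
  | nil => intro s t acc _; rfl
  | cons w ws ih =>
    intro s t acc hinv
    have hk := key cs toks w cs.length s t (by omega) hinv
    simp only [List.foldl_cons]
    have hstepA : aStep cs (s, acc) w =
        ((aFind cs w cs.length s).2,
          match (aFind cs w cs.length s).1 with
          | some (a, b) => acc ++ [((a : Int), (b : Int))]
          | none => acc) := by
      unfold aStep
      rcases h : aFind cs w cs.length s with ⟨o, s'⟩
      cases o with
      | some p => cases p; simp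
      | none => simp
    rw [hstepA]
    cases hg : toks[bAdvance toks w toks.length t]? with
    | some tok =>
      have h1 := hk.1; rw [hg] at h1
      have h2 := hk.2; rw [hg] at h2
      rw [h1]
      have : pStep toks (t, acc) w =
          (bAdvance toks w toks.length t + 1, acc ++ [((tok.1 : Int), (tok.2.1 : Int))]) := by
        unfold pStep; simp [hg]
      rw [this]
      exact ih _ _ _ h2
    | none =>
      have h1 := hk.1; rw [hg] at h1
      have h2 := hk.2; rw [hg] at h2
      rw [h1]
      have : pStep toks (t, acc) w = (bAdvance toks w toks.length t, acc) := by
        unfold pStep; simp [hg]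
      rw [this]
      exact ih _ _ _ h2

-- ===== lemmas for the B side =====

-- B's build pass = tokenize + fold the (text, index) pairs into the dict
theorem bBuild_eq (cs : List Char) :
    ∀ (fuel i : Nat) (spans : List (Int × Int)) (occ : PySem.Dict (List Char) (List Nat)),
      bBuild cs fuel i spans occ =
        (spans ++ (bTokens cs fuel i).map spanOf,
         (pairsOf (bTokens cs fuel i) spans.length).foldl
           (fun d p => d.modify p.1 [] (· ++ [p.2])) occ) := by
  intro fuel
  induction fuel with
  | zero => intro i spans occ; simp [bBuild, bTokens, pairsOf]
  | succ fuel ih =>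
    intro i spans occ
    rw [bBuild, bTokens]
    by_cases hi : i < cs.length
    · rw [dif_pos hi, dif_pos hi]
      by_cases ha : PySem.Chars.isalnum (cs[i]'hi) = true
      · rw [if_pos ha, if_pos ha]
        rw [ih]
        simp [pairsOf, spanOf]
      · rw [if_neg ha, if_neg ha]
        exact ih (i+1) spans occ
    · rw [dif_neg hi, dif_neg hi]
      simp [pairsOf]

theorem pairsOf_getElem? (toks : List (Nat × Nat × List Char)) :
    ∀ (idx k : Nat), (pairsOf toks idx)[k]? = toks[k]?.map (fun t => (t.2.2, idx + k)) := by
  induction toks with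
  | nil => intro idx k; simp [pairsOf]
  | cons tok ts ih =>
    intro idx k
    cases k with
    | zero => simp [pairsOf]
    | succ k =>
      simp only [pairsOf, List.getElem?_cons_succ, ih (idx+1) k]
      have h : idx + 1 + k = idx + (k + 1) := by omega
      rw [h]

theorem pairsOf_mem (toks : List (Nat × Nat × List Char)) (idx : Nat)
    (p : List Char × Nat) :
    p ∈ pairsOf toks idx ↔ ∃ k, ∃ h : k < toks.length, p = ((toks[k]'h).2.2, idx + k) := by
  rw [List.mem_iff_getElem?]
  constructor
  · rintro ⟨k, hk⟩
    rw [pairsOf_getElem? toks idx k] at hk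
    cases hg : toks[k]? with
    | none => rw [hg] at hk; simp at hk
    | some t =>
      rw [hg] at hk
      have hlt : k < toks.length := (List.getElem?_eq_some_iff.mp hg).1
      have ht : toks[k]'hlt = t := (List.getElem?_eq_some_iff.mp hg).2
      refine ⟨k, hlt, ?_⟩
      simp only [Option.map_some, Option.some.injEq] at hk
      rw [ht, ← hk]
  · rintro ⟨k, hk, rfl⟩
    exact ⟨k, by rw [pairsOf_getElem? toks idx k, List.getElem?_eq_getElem hk]; rfl⟩

theorem pairsOf_snd_ge (toks : List (Nat × Nat × List Char)) :
    ∀ (idx : Nat) (p : List Char × Nat), p ∈ pairsOf toks idx → idx ≤ p.2 := by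
  induction toks with
  | nil => intro idx p h; simp [pairsOf] at h
  | cons tok ts ih =>
    intro idx p h
    rcases (List.mem_cons).mp h with h | h
    · rw [h]
    · have := ih (idx+1) p h; omega

theorem pairsOf_pairwise (toks : List (Nat × Nat × List Char)) :
    ∀ idx, (pairsOf toks idx).Pairwise (fun a b => a.2 < b.2) := by
  induction toks with
  | nil => intro idx; simp [pairsOf]
  | cons tok ts ih =>
    intro idx
    refine List.Pairwise.cons ?_ (ih (idx+1))
    intro q hq
    have := pairsOf_snd_ge ts (idx+1) q hq
    simp; omega

theorem idxsOf_pairwise (toks : List (Nat × Nat × List Char)) (w : List Char) :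
    (idxsOf toks w).Pairwise (· < ·) := by
  unfold idxsOf
  exact List.Pairwise.map _ (fun a b h => h) ((pairsOf_pairwise toks 0).filter _)

theorem mem_idxsOf (toks : List (Nat × Nat × List Char)) (w : List Char) (i : Nat) :
    i ∈ idxsOf toks w ↔ ∃ h : i < toks.length, (toks[i]'h).2.2 = w := by
  unfold idxsOf
  simp only [List.mem_map, List.mem_filter]
  constructor
  · rintro ⟨p, ⟨hp, hw⟩, rfl⟩
    rcases (pairsOf_mem toks 0 p).mp hp with ⟨k, hk, rfl⟩
    simp only [Nat.zero_add]
    exact ⟨hk, by simpa using hw⟩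
  · rintro ⟨h, hw⟩
    refine ⟨((toks[i]'h).2.2, i), ⟨?_, by simpa using hw⟩, rfl⟩
    exact (pairsOf_mem toks 0 _).mpr ⟨i, h, by simp⟩

-- element/monotonicity views of the occurrence list
theorem idxsOf_elem (toks : List (Nat × Nat × List Char)) (w : List Char)
    (p : Nat) (hp : p < (idxsOf toks w).length) :
    ∃ h : (idxsOf toks w)[p] < toks.length, (toks[(idxsOf toks w)[p]]'h).2.2 = w :=
  (mem_idxsOf toks w _).mp (List.getElem_mem hp)

theorem idxsOf_mono (toks : List (Nat × Nat × List Char)) (w : List Char)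
    (p q : Nat) (hp : p < (idxsOf toks w).length) (hq : q < (idxsOf toks w).length)
    (hpq : p < q) : (idxsOf toks w)[p] < (idxsOf toks w)[q] :=
  (List.pairwise_iff_getElem.mp (idxsOf_pairwise toks w)) p q hp hq hpq

-- the dict built by the build pass answers occ.getD w [] = idxsOf toks w
theorem occ_getD (toks : List (Nat × Nat × List Char)) (w : List Char) :
    ((pairsOf toks 0).foldl (fun d p => d.modify p.1 [] (· ++ [p.2]))
        (PySem.Dict.empty : PySem.Dict (List Char) (List Nat))).getD w []
      = idxsOf toks w := by
  rw [PySem.Dict.getD_foldl_modify_append]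
  simp [idxsOf, PySem.Dict.getD_empty]

-- spec of the cursor-advance loop
theorem cursorAdv_spec (lst : List Nat) (t : Nat) :
    ∀ (fuel k0 : Nat), lst.length ≤ k0 + fuel → k0 ≤ lst.length →
      k0 ≤ cursorAdv lst t fuel k0 ∧ cursorAdv lst t fuel k0 ≤ lst.length ∧
      (∀ p (hp : p < lst.length), k0 ≤ p → p < cursorAdv lst t fuel k0 → lst[p] < t) ∧
      (∀ h : cursorAdv lst t fuel k0 < lst.length, t ≤ lst[cursorAdv lst t fuel k0]) := by
  intro fuel
  induction fuel with
  | zero =>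
    intro k0 hf hk
    have : k0 = lst.length := by omega
    refine ⟨le_refl _, by simp [cursorAdv]; omega, ?_, ?_⟩
    · intro p hp h1 h2; simp [cursorAdv] at h2; omega
    · intro h; simp [cursorAdv] at h; omega
  | succ fuel ih =>
    intro k0 hf hk
    cases hg : lst[k0]? with
    | none =>
      have : lst.length ≤ k0 := by
        by_contra hc
        rw [List.getElem?_eq_getElem (by omega)] at hg; simp at hg
      have hr : cursorAdv lst t (fuel+1) k0 = k0 := by rw [cursorAdv, hg]
      rw [hr]
      exact ⟨le_refl _, hk, fun p hp h1 h2 => by omega, fun h => by omega⟩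
    | some v =>
      have hk0 : k0 < lst.length := (List.getElem?_eq_some_iff.mp hg).1
      have hv : lst[k0]'hk0 = v := (List.getElem?_eq_some_iff.mp hg).2
      by_cases hvt : v < t
      · have hr : cursorAdv lst t (fuel+1) k0 = cursorAdv lst t fuel (k0+1) := by
          rw [cursorAdv, hg]; simp [hvt]
        rw [hr]
        obtain ⟨h1, h2, h3, h4⟩ := ih (k0+1) (by omega) (by omega)
        refine ⟨by omega, h2, ?_, h4⟩
        intro p hp hle hlt
        rcases Nat.eq_or_lt_of_le hle with rfl | hgt
        · rw [hv]; exact hvt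
        · exact h3 p hp (by omega) hlt
      · have hr : cursorAdv lst t (fuel+1) k0 = k0 := by
          rw [cursorAdv, hg]; simp [hvt]
        rw [hr]
        exact ⟨le_refl _, by omega, fun p hp h1 h2 => by omega,
          fun h => by rw [hv]; omega⟩

-- spec of the pointer walk: first token index ≥ t whose text is the word
theorem bAdv_spec (toks : List (Nat × Nat × List Char)) (w : List Char) :
    ∀ (fuel t : Nat), toks.length ≤ t + fuel → t ≤ toks.length →
      t ≤ bAdvance toks w fuel t ∧ bAdvance toks w fuel t ≤ toks.length ∧
      (∀ i (hi : i < toks.length), t ≤ i → i < bAdvance toks w fuel t →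
        (toks[i]'hi).2.2 ≠ w) ∧
      (∀ h : bAdvance toks w fuel t < toks.length, (toks[bAdvance toks w fuel t]'h).2.2 = w) := by
  intro fuel
  induction fuel with
  | zero =>
    intro t hf ht
    have : t = toks.length := by omega
    refine ⟨le_refl _, by simp [bAdvance]; omega, ?_, ?_⟩
    · intro i hi h1 h2; simp [bAdvance] at h2; omega
    · intro h; simp [bAdvance] at h; omega
  | succ fuel ih =>
    intro t hf ht
    cases hg : toks[t]? with
    | none =>
      have : toks.length ≤ t := by
        by_contra hc
        rw [List.getElem?_eq_getElem (by omega)] at hg; simp at hg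
      rw [bAdv_none toks w t hg (fuel+1)]
      exact ⟨le_refl _, ht, fun i hi h1 h2 => by omega, fun h => by omega⟩
    | some tok =>
      have ht0 : t < toks.length := (List.getElem?_eq_some_iff.mp hg).1
      have htok : toks[t]'ht0 = tok := (List.getElem?_eq_some_iff.mp hg).2
      by_cases hw : tok.2.2 = w
      · rw [bAdv_stop toks w t tok hg hw (fuel+1)]
        refine ⟨le_refl _, by omega, fun i hi h1 h2 => by omega, fun h => by rw [htok]; exact hw⟩
      · rw [bAdv_next toks w t tok hg hw fuel]
        obtain ⟨h1, h2, h3, h4⟩ := ih (t+1) (by omega) (by omega)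
        refine ⟨by omega, h2, ?_, h4⟩
        intro i hi hle hlt
        rcases Nat.eq_or_lt_of_le hle with rfl | hgt
        · rw [htok]; exact hw
        · exact h3 i hi (by omega) hlt
    
-- the pointer fold from an exhausted pointer appends nothing
theorem fold_keeps (toks : List (Nat × Nat × List Char)) :
    ∀ (ws : List (List Char)) (acc : List (Int × Int)),
      (ws.foldl (pStep toks) (toks.length, acc)).2 = acc := by
  intro ws
  induction ws with
  | nil => intro acc; rfl
  | cons w ws ih =>
    intro acc
    have hget : toks[toks.length]? = none := by simp
    have hstep : pStep toks (toks.length, acc) w = (toks.length, acc) := by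
      simp only [pStep, bAdv_none toks w toks.length hget, hget]
    simp only [List.foldl_cons, hstep, ih]

-- the heart: B's indexed matching ≡ the pointer fold, under the cursor invariant
theorem match_eq (toks : List (Nat × Nat × List Char)) (occ : PySem.Dict (List Char) (List Nat))
    (hocc : ∀ w, occ.getD w [] = idxsOf toks w) :
    ∀ (words : List (List Char)) (t : Nat) (cursors : PySem.Dict (List Char) Nat)
      (acc : List (Int × Int)),
      t ≤ toks.length →
      (∀ w, cursors.getD w 0 ≤ (idxsOf toks w).length) →
      (∀ w p (hp : p < (idxsOf toks w).length), p < cursors.getD w 0 → (idxsOf toks w)[p] < t) →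
      bMatch (toks.map spanOf) occ words t cursors acc
        = (words.foldl (pStep toks) (t, acc)).2 := by
  intro words
  induction words with
  | nil => intro t cursors acc _ _ _; rfl
  | cons w ws ih =>
    intro t cursors acc hT hlen hinv
    have hocw : occ.getD w [] = idxsOf toks w := hocc w
    obtain ⟨hc1, hc2, hc3, hc4⟩ :=
      cursorAdv_spec (idxsOf toks w) t (idxsOf toks w).length (cursors.getD w 0)
        (by omega) (hlen w)
    set k := cursorAdv (idxsOf toks w) t (idxsOf toks w).length (cursors.getD w 0) with hkdef
    -- every occurrence before the cursor result is < t
    have hbefore : ∀ p (hp : p < (idxsOf toks w).length), p < k → (idxsOf toks w)[p] < t := by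
      intro p hp hpk
      by_cases hp0 : p < cursors.getD w 0
      · exact hinv w p hp hp0
      · exact hc3 p hp (by omega) hpk
    obtain ⟨hr1, hr2, hr3, hr4⟩ := bAdv_spec toks w toks.length t (by omega) hT
    set r := bAdvance toks w toks.length t with hrdef
    rw [bMatch]
    simp only [hocw, ← hkdef]
    by_cases hkend : k = (idxsOf toks w).length
    · -- no occurrence of w at index ≥ t: the pointer walk exhausts the tokens too
      rw [if_pos hkend]
      have hrlen : r = toks.length := by
        by_contra hc
        have hrlt : r < toks.length := by omega
        have hmem : r ∈ idxsOf toks w := (mem_idxsOf toks w r).mpr ⟨hrlt, hr4 hrlt⟩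
        obtain ⟨p, hp, hpr⟩ := List.mem_iff_getElem.mp hmem
        have := hbefore p hp (by omega)
        omega
      have hget : toks[toks.length]? = none := by simp
      have hstep : pStep toks (t, acc) w = (toks.length, acc) := by
        simp only [pStep, ← hrdef, hrlen, hget]
      simp only [List.foldl_cons, hstep, fold_keeps toks ws acc]
    · rw [if_neg hkend]
      have hklt : k < (idxsOf toks w).length := by omega
      rw [List.getElem?_eq_getElem hklt]
      obtain ⟨hvlen, hvtext⟩ := idxsOf_elem toks w k hklt
      have hvt : t ≤ (idxsOf toks w)[k] := hc4 hklt
      -- the pointer walk stops exactly at the occurrence the cursor found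
      have hrv : r = (idxsOf toks w)[k] := by
        have hle : r ≤ (idxsOf toks w)[k] := by
          by_contra hc
          exact hr3 _ hvlen hvt (by omega) hvtext
        by_cases hre : r = (idxsOf toks w)[k]
        · exact hre
        · exfalso
          have hrlt : r < toks.length := by omega
          have hmem : r ∈ idxsOf toks w := (mem_idxsOf toks w r).mpr ⟨hrlt, hr4 hrlt⟩
          obtain ⟨p, hp, hpr⟩ := List.mem_iff_getElem.mp hmem
          have hge : k ≤ p := by
            by_contra hc2
            have := hbefore p hp (by omega)
            omega
          rcases Nat.eq_or_lt_of_le hge with rfl | hgt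
          · omega
          · have := idxsOf_mono toks w k p hklt hp hgt
            omega
      have htokget : toks[(idxsOf toks w)[k]]? = some (toks[(idxsOf toks w)[k]]'hvlen) :=
        List.getElem?_eq_getElem hvlen
      have hstep : pStep toks (t, acc) w =
          ((idxsOf toks w)[k] + 1,
            acc ++ [(((toks[(idxsOf toks w)[k]]'hvlen).1 : Int),
                     ((toks[(idxsOf toks w)[k]]'hvlen).2.1 : Int))]) := by
        simp only [pStep, ← hrdef, hrv, htokget]
      have hspan : (((toks.map spanOf)[(idxsOf toks w)[k]]?).getD (0, 0))
          = (((toks[(idxsOf toks w)[k]]'hvlen).1 : Int),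
             ((toks[(idxsOf toks w)[k]]'hvlen).2.1 : Int)) := by
        rw [List.getElem?_map, List.getElem?_eq_getElem hvlen]
        rfl
      show bMatch (toks.map spanOf) occ ws ((idxsOf toks w)[k] + 1) (cursors.insert w (k+1))
            (acc ++ [((toks.map spanOf)[(idxsOf toks w)[k]]?).getD (0, 0)])
          = (List.foldl (pStep toks) (t, acc) (w :: ws)).2
      rw [hspan]
      simp only [List.foldl_cons, hstep]
      apply ih ((idxsOf toks w)[k] + 1) (cursors.insert w (k+1)) _ (by omega)
      · intro w'
        by_cases hww : w' = w
        · subst hww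
          rw [PySem.Dict.getD_insert_self]
          omega
        · rw [PySem.Dict.getD_insert_of_ne _ _ _ hww]
          exact hlen w'
      · intro w' p hp hpc
        by_cases hww : w' = w
        · subst hww
          rw [PySem.Dict.getD_insert_self] at hpc
          rcases Nat.lt_succ_iff_lt_or_eq.mp hpc with hlt | rfl
          · have := hbefore p hp hlt; omega
          · omega
        · rw [PySem.Dict.getD_insert_of_ne _ _ _ hww] at hpc
          have := hinv w' p hp hpc
          omega

-- ===== VERDICT (by name: the statement is the Claim_ definition above) =====
theorem get_word_positions_py_spec : Claim_equal_get_word_positions_py := by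
  intro original processed _
  unfold Spec_get_word_positions_py get_word_positions_py get_word_positions_py_alt
  show (List.foldl (aStep original.toList) (0, []) (PySem.Chars.split₀ processed.toList)).2
      = bMatch (bBuild original.toList original.toList.length 0 [] PySem.Dict.empty).1
          (bBuild original.toList original.toList.length 0 [] PySem.Dict.empty).2
          (PySem.Chars.split₀ processed.toList) 0 PySem.Dict.empty []
  rw [bBuild_eq original.toList original.toList.length 0 [] PySem.Dict.empty]
  show _ = bMatch
      (List.map spanOf (bTokens original.toList original.toList.length 0))
      ((pairsOf (bTokens original.toList original.toList.length 0) ([] : List (Int × Int)).length).foldl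
        (fun d p => d.modify p.1 [] (· ++ [p.2])) PySem.Dict.empty)
      (PySem.Chars.split₀ processed.toList) 0 PySem.Dict.empty []
  simp only [List.length_nil]
  rw [match_eq (bTokens original.toList original.toList.length 0) _
    (fun w => occ_getD (bTokens original.toList original.toList.length 0) w)
    (PySem.Chars.split₀ processed.toList) 0 PySem.Dict.empty [] (by omega)
    (by intro w; rw [PySem.Dict.getD_empty]; omega)
    (by intro w p hp hpc; rw [PySem.Dict.getD_empty] at hpc; omega)]
  exact fold_eq original.toList (bTokens original.toList original.toList.length 0)
    (PySem.Chars.split₀ processed.toList) 0 0 [] (by simp)
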